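-- pv_equiv track=rewrite | github.com/ahmetgurel/CsvMerge | csvMerge.py | join_dicts
-- ===== SOURCE A (Python) =====
-- def join_dicts(dicts):    #Name değişkenine göre gezerek aynı olanları tek sütüna aynı yoksa bir alt satıra yazmaya yarıyor
--     joined_dict = {}
--     for dict_list in dicts:
--         for item in dict_list:
--             if item['Name'] != '':  # Name sütununda ' işareti bulunanları atlamamıza yarıyor
--                 if item['Name'] in joined_dict or item['Name'].lower() in joined_dict:  #Hepsini küçük harfe çeviriyor
--                     joined_dict[item['Name'].lower()].update(item)
--                 else:
--                     joined_dict[item['Name'].lower()] = item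
--     return joined_dict
-- ===== SOURCE B (Python) =====
-- def join_dicts(dicts):
--     # Pass 1: group items by lowercased Name (skip blank names), keeping first-seen key order.
--     groups = {}
--     for dict_list in dicts:
--         for item in dict_list:
--             if item['Name'] != '':
--                 groups.setdefault(item['Name'].lower(), []).append(item)
--     # Pass 2: fold each group into its first item (mutated in place, as A does).
--     joined_dict = {}
--     for key, items in groups.items():
--         base = items[0]
--         for other in items[1:]:
--             base.update(other)
--         joined_dict[key] = base
--     return joined_dict
-- ===== Notes on version B (the rewrite author's own statement) =====
-- stated objective: alternative
-- what changed: B replaces A's single-pass membership-test-then-update loop with a two-phase decomposition: first group all items by lowercased Name into ordered lists, then fold each group into its first item and emit the result dict; the redundant raw-name membership test disappears.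
-- outside the precondition, e.g. on join_dicts([[{'x': '1'}]]): A raises KeyError, B raises KeyError
import Mathlib
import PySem

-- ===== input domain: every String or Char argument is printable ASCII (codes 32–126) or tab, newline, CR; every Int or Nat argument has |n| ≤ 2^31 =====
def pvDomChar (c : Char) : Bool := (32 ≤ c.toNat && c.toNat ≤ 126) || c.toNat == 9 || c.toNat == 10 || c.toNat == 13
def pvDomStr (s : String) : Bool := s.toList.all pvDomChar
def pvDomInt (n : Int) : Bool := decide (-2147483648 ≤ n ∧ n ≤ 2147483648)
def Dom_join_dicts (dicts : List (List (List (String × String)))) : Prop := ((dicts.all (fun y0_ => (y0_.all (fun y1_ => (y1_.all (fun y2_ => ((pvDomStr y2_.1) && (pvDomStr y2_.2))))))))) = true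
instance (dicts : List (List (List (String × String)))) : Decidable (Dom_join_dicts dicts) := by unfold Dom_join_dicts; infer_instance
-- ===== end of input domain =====

-- B regroups the items by lowercased Name first and merges each group afterwards, instead of
-- A's single pass with a membership test; same return value (in Python both also mutate the
-- first item of each group in place via dict.update — the theorems here are about the return value).

-- d.update(other) on an item stored as an association list (shared helper: both Pythons
-- call dict.update on the merged item).
def pyUpd (b : List (String × String)) (o : List (String × String)) : List (String × String) :=
  ((PySem.Dict.mk b).update o).items

-- ===== PORT A =====
def join_dicts (dicts : List (List (List (String × String)))) : List (String × List (String × String)) :=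
  (dicts.foldl (fun joined_dict dict_list =>
    dict_list.foldl (fun joined_dict item =>
      -- item['Name']: Pre_ guarantees the key is present (KeyError otherwise)
      let name := (PySem.Dict.mk item).getD "Name" ""
      if name ≠ "" then
        if joined_dict.contains name || joined_dict.contains (PySem.Str.lower name) then
          -- joined_dict[name.lower()].update(item); the key is present whenever this branch
          -- is taken (str.lower is idempotent, lemma isupper_lowerChar below), so modify is exact
          joined_dict.modify (PySem.Str.lower name) [] (fun v => pyUpd v item)
        else
          joined_dict.insert (PySem.Str.lower name) item
      else joined_dict) joined_dict)
    (PySem.Dict.empty : PySem.Dict String (List (String × String)))).items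

-- ===== PORT B =====
-- B pass 2 inner loop: base = items[0]; for other in items[1:]: base.update(other)
def mergeGroup (l : List (List (String × String))) : List (String × String) :=
  match l with
  | [] => []
  | base :: rest => rest.foldl pyUpd base

def join_dicts_alt (dicts : List (List (List (String × String)))) : List (String × List (String × String)) :=
  let groups := dicts.foldl (fun groups dict_list =>
    dict_list.foldl (fun groups item =>
      let name := (PySem.Dict.mk item).getD "Name" ""   -- item['Name'], present under Pre_
      if name ≠ "" then
        -- groups.setdefault(name.lower(), []).append(item)
        groups.modify (PySem.Str.lower name) [] (fun l => l ++ [item])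
      else groups) groups)
    (PySem.Dict.empty : PySem.Dict String (List (List (String × String))))
  (groups.items.foldl (fun joined_dict p => joined_dict.insert p.1 (mergeGroup p.2))
    (PySem.Dict.empty : PySem.Dict String (List (String × String)))).items

-- ===== PRECONDITION & SPEC =====
-- Pre_ excludes (a) items without a 'Name' key, on which A raises KeyError, and (b) items whose
-- association list repeats a key, which do not represent any Python dict (a Python dict
-- collapses duplicate keys, so such lists have no faithful Python counterpart).
def Pre_join_dicts (dicts : List (List (List (String × String)))) : Prop :=
  ∀ dict_list ∈ dicts, ∀ item ∈ dict_list,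
    "Name" ∈ item.map Prod.fst ∧ (item.map Prod.fst).Nodup

instance (dicts : List (List (List (String × String)))) : Decidable (Pre_join_dicts dicts) := by
  unfold Pre_join_dicts; infer_instance

def pvWitness_join_dicts : (List (List (List (String × String)))) :=
  [[[("Name", "Bob"), ("a", "1")], [("Name", "bOb"), ("b", "2")]], [[("Name", "")]]]

def Spec_join_dicts (dicts : List (List (List (String × String)))) (out : List (String × List (String × String))) : Prop := out = join_dicts_alt dicts
instance (dicts : List (List (List (String × String)))) (out : List (String × List (String × String))) : Decidable (Spec_join_dicts dicts out) := by unfold Spec_join_dicts; infer_instance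

-- ===== CLAIM (what is proved, stated in full; the proofs are below) =====
def Claim_equal_join_dicts : Prop := ∀ (dicts : List (List (List (String × String)))), Dom_join_dicts dicts → Pre_join_dicts dicts → Spec_join_dicts dicts (join_dicts dicts)

-- ===== LEMMAS AND PROOFS =====

-- Python str.lower is idempotent (character-wise).
lemma isupper_lowerChar (c : Char) :
    PySem.Chars.isupper (PySem.Chars.lowerChar c) = false := by
  by_cases h : ('A' ≤ c ∧ c ≤ 'Z')
  · have e1 : PySem.Chars.lowerChar c = Char.ofNat (c.toNat + 32) := by
      simp [PySem.Chars.lowerChar, PySem.Chars.isupper, h.1, h.2]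
    have eA : 'A'.toNat = 65 := by decide
    have eZ : 'Z'.toNat = 90 := by decide
    have hA : 'A'.toNat ≤ c.toNat := h.1
    have hZ : c.toNat ≤ 'Z'.toNat := h.2
    have hv : (Char.ofNat (c.toNat + 32)).toNat = c.toNat + 32 := by
      unfold Char.ofNat
      rw [dif_pos (Or.inl (by omega))]
      show (Char.ofNatAux _ _).val.toNat = _
      simp only [Char.ofNatAux]
      exact UInt32.toNat_ofNatLT
    have hnle : ¬ (Char.ofNat (c.toNat + 32) ≤ 'Z') := by
      intro hle
      have h90 : (Char.ofNat (c.toNat + 32)).toNat ≤ 'Z'.toNat := hle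
      omega
    rw [e1]
    simp [PySem.Chars.isupper, hnle]
  · have hb : (decide ('A' ≤ c) && decide (c ≤ 'Z')) = false := by
      rcases not_and_or.mp h with h' | h' <;> simp [h']
    have e1 : PySem.Chars.lowerChar c = c := by
      simp [PySem.Chars.lowerChar, PySem.Chars.isupper, hb]
    rw [e1]
    simp only [PySem.Chars.isupper]
    exact hb

lemma lowerChar_lowerChar (c : Char) :
    PySem.Chars.lowerChar (PySem.Chars.lowerChar c) = PySem.Chars.lowerChar c := by
  have unf : ∀ d, PySem.Chars.lowerChar d
      = if PySem.Chars.isupper d = true then Char.ofNat (d.toNat + 32) else d := fun _ => rfl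
  rw [unf (PySem.Chars.lowerChar c)]
  simp [isupper_lowerChar]

lemma lower_lower (s : String) :
    PySem.Str.lower (PySem.Str.lower s) = PySem.Str.lower s := by
  have h : (PySem.Str.lower (PySem.Str.lower s)).toList = (PySem.Str.lower s).toList := by
    simp only [PySem.Str.toList_lower, PySem.Chars.lower, List.map_map]
    exact List.map_congr_left (fun c _ => lowerChar_lowerChar c)
  exact String.toList_injective h

-- A's accumulator as a function of B's groups accumulator.
def toA (g : PySem.Dict String (List (List (String × String)))) :
    PySem.Dict String (List (String × String)) :=
  PySem.Dict.mk (g.items.map (fun p => (p.1, mergeGroup p.2)))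

-- The two loop bodies (definitionally the bodies of the two ports' inner folds).
def stepA (jd : PySem.Dict String (List (String × String)))
    (item : List (String × String)) : PySem.Dict String (List (String × String)) :=
  let name := (PySem.Dict.mk item).getD "Name" ""
  if name ≠ "" then
    if jd.contains name || jd.contains (PySem.Str.lower name) then
      jd.modify (PySem.Str.lower name) [] (fun v => pyUpd v item)
    else jd.insert (PySem.Str.lower name) item
  else jd

def stepG (g : PySem.Dict String (List (List (String × String))))
    (item : List (String × String)) : PySem.Dict String (List (List (String × String))) :=
  let name := (PySem.Dict.mk item).getD "Name" ""
  if name ≠ "" then g.modify (PySem.Str.lower name) [] (fun l => l ++ [item]) else g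

-- The invariant carried by the grouping accumulator: keys lowercased, unique, groups nonempty.
def GInv (g : PySem.Dict String (List (List (String × String)))) : Prop :=
  (∀ k ∈ g.keys, PySem.Str.lower k = k) ∧ g.keys.Nodup ∧ (∀ p ∈ g.items, p.2 ≠ [])

lemma contains_toA (g : PySem.Dict String (List (List (String × String)))) (k : String) :
    (toA g).contains k = g.contains k := by
  simp [toA, PySem.Dict.contains, List.any_map, Function.comp_def]

lemma get?_toA (g : PySem.Dict String (List (List (String × String)))) (k : String) :
    (toA g).get? k = (g.get? k).map mergeGroup := by
  simp only [toA, PySem.Dict.get?, List.find?_map, Option.map_map]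
  rfl

lemma getD_toA (g : PySem.Dict String (List (List (String × String)))) (k : String) :
    (toA g).getD k [] = mergeGroup (g.getD k []) := by
  rw [PySem.Dict.getD_eq_get?_getD, PySem.Dict.getD_eq_get?_getD, get?_toA]
  cases g.get? k <;> rfl

lemma toA_insert (g : PySem.Dict String (List (List (String × String)))) (k : String)
    (v : List (List (String × String))) :
    toA (g.insert k v) = (toA g).insert k (mergeGroup v) := by
  apply PySem.Dict.ext
  by_cases hc : g.contains k = true
  · have hc' : (toA g).contains k = true := by rw [contains_toA]; exact hc
    show (g.insert k v).items.map _ = _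
    rw [PySem.Dict.items_insert_of_contains g v hc,
        PySem.Dict.items_insert_of_contains (toA g) (mergeGroup v) hc']
    show _ = (g.items.map _).map _
    rw [List.map_map, List.map_map]
    apply List.map_congr_left
    intro p _
    by_cases hp : p.1 = k
    · simp [hp]
    · simp [hp]
  · have hcf : g.contains k = false := by simpa using hc
    have hcf' : (toA g).contains k = false := by rw [contains_toA]; exact hcf
    show (g.insert k v).items.map _ = _
    rw [PySem.Dict.items_insert_of_not_contains g v hcf,
        PySem.Dict.items_insert_of_not_contains (toA g) (mergeGroup v) hcf']
    simp [toA]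

lemma mergeGroup_append (l : List (List (String × String))) (x : List (String × String))
    (hl : l ≠ []) : mergeGroup (l ++ [x]) = pyUpd (mergeGroup l) x := by
  cases l with
  | nil => exact absurd rfl hl
  | cons b r => simp [mergeGroup, List.foldl_append]

lemma step_comm (g : PySem.Dict String (List (List (String × String))))
    (item : List (String × String)) (hg : GInv g) :
    stepA (toA g) item = toA (stepG g item) := by
  simp only [stepA, stepG]
  by_cases hn : ((PySem.Dict.mk item).getD "Name" "" : String) ≠ ""
  · rw [if_pos hn, if_pos hn]
    set name := (PySem.Dict.mk item).getD "Name" "" with hname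
    set key := PySem.Str.lower name with hkey
    have hcond : ((toA g).contains name || (toA g).contains key) = g.contains key := by
      rw [contains_toA, contains_toA]
      by_cases hc : g.contains name = true
      · have hmem : name ∈ g.keys := (PySem.Dict.contains_iff_mem_keys g name).mp hc
        have hkn : key = name := hg.1 name hmem
        rw [hkn, hc]
        simp
      · simp [Bool.eq_false_iff.mpr hc]
    rw [hcond]
    by_cases hck : g.contains key = true
    · rw [if_pos hck]
      simp only [PySem.Dict.modify]
      rw [toA_insert, getD_toA]
      have hne : g.getD key [] ≠ [] := by
        rcases ho : g.get? key with _ | l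
        · exact absurd ((PySem.Dict.get?_eq_none_iff_contains g key).mp ho) (by simp [hck])
        · have hmem := hg.2.2 (key, l) (PySem.Dict.mem_items_of_get?_eq_some g ho)
          rw [PySem.Dict.getD_eq_get?_getD, ho]
          exact hmem
      rw [mergeGroup_append _ _ hne]
    · have hckf : g.contains key = false := by simpa using hck
      rw [if_neg hck]
      simp only [PySem.Dict.modify]
      rw [toA_insert, PySem.Dict.getD_of_not_contains g [] hckf]
      rfl
  · rw [if_neg hn, if_neg hn]

lemma ginv_step (g : PySem.Dict String (List (List (String × String))))
    (item : List (String × String)) (hg : GInv g) : GInv (stepG g item) := by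
  simp only [stepG]
  by_cases hn : ((PySem.Dict.mk item).getD "Name" "" : String) ≠ ""
  · rw [if_pos hn]
    set name := (PySem.Dict.mk item).getD "Name" "" with hname
    set key := PySem.Str.lower name with hkey
    simp only [PySem.Dict.modify]
    refine ⟨?_, PySem.Dict.nodup_keys_insert _ _ _ hg.2.1, ?_⟩
    · intro k hk
      rcases (PySem.Dict.mem_keys_insert g key k _).mp hk with h | h
      · rw [h, hkey]; exact lower_lower name
      · exact hg.1 k h
    · intro p hp
      rcases (PySem.Dict.mem_items_insert g key _ p).mp hp with h | h
      · rw [h]; simp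
      · exact hg.2.2 p h.1
  · rw [if_neg hn]; exact hg

lemma ginv_fold (L : List (List (String × String)))
    (g : PySem.Dict String (List (List (String × String)))) (hg : GInv g) :
    GInv (L.foldl stepG g) := by
  induction L generalizing g with
  | nil => exact hg
  | cons x xs ih => exact ih _ (ginv_step g x hg)

lemma main_fold (L : List (List (String × String)))
    (g : PySem.Dict String (List (List (String × String)))) (hg : GInv g) :
    L.foldl stepA (toA g) = toA (L.foldl stepG g) := by
  induction L generalizing g with
  | nil => rfl
  | cons x xs ih =>
    simp only [List.foldl_cons, step_comm g x hg]
    exact ih _ (ginv_step g x hg)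

lemma ginv_empty : GInv (PySem.Dict.empty) := by
  refine ⟨?_, ?_, ?_⟩ <;> simp [PySem.Dict.empty, PySem.Dict.keys]

-- ===== VERDICT (by name: the statement is the Claim_ definition above) =====
theorem join_dicts_spec : Claim_equal_join_dicts := by
  intro dicts _ _
  show join_dicts dicts = join_dicts_alt dicts
  have hA2 : join_dicts dicts
      = (dicts.foldl (fun jd dl => dl.foldl stepA jd) PySem.Dict.empty).items := rfl
  have hG : join_dicts_alt dicts
      = ((dicts.foldl (fun g dl => dl.foldl stepG g) PySem.Dict.empty).items.foldl
          (fun jd p => jd.insert p.1 (mergeGroup p.2)) PySem.Dict.empty).items := rfl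
  have hA : (dicts.foldl (fun jd dl => dl.foldl stepA jd) PySem.Dict.empty)
      = toA (dicts.foldl (fun g dl => dl.foldl stepG g) PySem.Dict.empty) := by
    rw [← List.foldl_flatten, ← List.foldl_flatten]
    have he : (PySem.Dict.empty : PySem.Dict String (List (String × String)))
        = toA PySem.Dict.empty := rfl
    rw [he, main_fold _ _ ginv_empty]
  have hnd : ((dicts.foldl (fun g dl => dl.foldl stepG g) PySem.Dict.empty).items.map
      Prod.fst).Nodup := by
    have h := (ginv_fold dicts.flatten _ ginv_empty).2.1
    rw [← List.foldl_flatten]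
    exact h
  rw [hA2, hG, hA]
  rw [PySem.Dict.items_foldl_insert_fresh _ Prod.fst (fun p => mergeGroup p.2)
        PySem.Dict.empty (fun a _ => rfl) hnd]
  simp [toA, PySem.Dict.empty]
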